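-- pv_equiv track=rewrite | github.com/iveL91/Advent-of-Code-2020 | 16/main.py | valid_property
-- ===== SOURCE A (Python) =====
-- from typing import Iterable, NamedTuple
--
-- def in_range(number: int, lower: int, upper: int) -> bool:
--     return lower <= number <= upper
--
-- def valid_property(property_ranges: Iterable[tuple[int, int]], values: Iterable[int]) -> bool:
--     for value in values:
--         for property_range in property_ranges:
--             if in_range(value, *property_range):
--                 break
--         else:
--             return False
--     return True
-- ===== SOURCE B (Python) =====
-- def valid_property(property_ranges, values):
--     remaining = set(values)
--     for lower, upper in property_ranges:
--         if not remaining: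
--             break
--         remaining = {v for v in remaining if v < lower or v > upper}
--     return not remaining
-- ===== Notes on version B (the rewrite author's own statement) =====
-- stated objective: alternative
-- what changed: Range-major instead of value-major: B builds set(values) once and lets each range filter out the values it covers (with an early stop once empty), returning whether the set emptied, instead of A's per-value scan over all ranges.
import Mathlib
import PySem

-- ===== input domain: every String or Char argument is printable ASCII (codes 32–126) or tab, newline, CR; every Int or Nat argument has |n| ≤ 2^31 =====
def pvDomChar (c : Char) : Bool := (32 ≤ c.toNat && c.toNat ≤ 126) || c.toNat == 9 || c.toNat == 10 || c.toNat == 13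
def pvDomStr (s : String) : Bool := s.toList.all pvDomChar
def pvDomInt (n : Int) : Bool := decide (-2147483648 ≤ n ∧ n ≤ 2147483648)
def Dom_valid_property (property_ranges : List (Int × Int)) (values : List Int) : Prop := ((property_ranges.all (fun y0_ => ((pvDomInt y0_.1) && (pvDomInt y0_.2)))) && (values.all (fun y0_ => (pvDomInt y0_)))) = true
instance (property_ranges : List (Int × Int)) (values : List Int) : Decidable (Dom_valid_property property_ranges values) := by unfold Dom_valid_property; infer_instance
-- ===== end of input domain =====

-- B flips the loop order: set(values) once, each range filters out the values it covers
-- (early stop when empty); same return value, alternative traversal (no speed claim).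

-- ===== PORT A =====
def pvInRange (number : Int) (lower : Int) (upper : Int) : Bool :=
  decide (lower ≤ number) && decide (number ≤ upper)

-- inner 'for property_range in property_ranges: if in_range: break / else: return False'
def pvAnyRange (property_ranges : List (Int × Int)) (value : Int) : Bool :=
  match property_ranges with
  | [] => false
  | r :: rest => if pvInRange value r.1 r.2 then true else pvAnyRange rest value

def valid_property (property_ranges : List (Int × Int)) (values : List Int) : Bool :=
  match values with
  | [] => true
  | v :: rest =>
    if pvAnyRange property_ranges v then valid_property property_ranges rest
    else false

-- ===== PORT B =====
def valid_property_alt (property_ranges : List (Int × Int)) (values : List Int) : Bool :=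
  (property_ranges.foldl
    (fun s r => if s.isEmpty then s
                else s.filter (fun v => decide (v < r.1) || decide (v > r.2)))
    (PySem.Set.ofList values : List Int)).isEmpty

-- ===== PRECONDITION & SPEC =====
def Spec_valid_property (property_ranges : List (Int × Int)) (values : List Int) (out : Bool) : Prop := out = valid_property_alt property_ranges values
instance (property_ranges : List (Int × Int)) (values : List Int) (out : Bool) : Decidable (Spec_valid_property property_ranges values out) := by unfold Spec_valid_property; infer_instance

-- ===== CLAIM (what is proved, stated in full; the proofs are below) =====
def Claim_equal_valid_property : Prop := ∀ (property_ranges : List (Int × Int)) (values : List Int), Dom_valid_property property_ranges values → Spec_valid_property property_ranges values (valid_property property_ranges values)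

-- ===== LEMMAS AND PROOFS =====

theorem pvAnyRange_eq_any (rs : List (Int × Int)) (v : Int) :
    pvAnyRange rs v = rs.any (fun r => decide (r.1 ≤ v ∧ v ≤ r.2)) := by
  induction rs with
  | nil => rfl
  | cons r rest ih =>
    simp only [pvAnyRange, pvInRange, List.any_cons, ih]
    by_cases h1 : r.1 ≤ v <;> by_cases h2 : v ≤ r.2 <;> simp [h1, h2]

theorem valid_property_eq_all (rs : List (Int × Int)) (vs : List Int) :
    valid_property rs vs = vs.all (fun v => pvAnyRange rs v) := by
  induction vs with
  | nil => rfl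
  | cons v rest ih =>
    simp only [valid_property, List.all_cons, ih]
    by_cases h : pvAnyRange rs v <;> simp [h]

theorem foldl_filter_eq (rs : List (Int × Int)) (s : List Int) :
    rs.foldl (fun s r => if s.isEmpty then s
                else s.filter (fun v => decide (v < r.1) || decide (v > r.2))) s
      = s.filter (fun v => rs.all (fun r => decide (v < r.1) || decide (v > r.2))) := by
  induction rs generalizing s with
  | nil => simp
  | cons r rest ih =>
    simp only [List.foldl_cons]
    by_cases hs : s.isEmpty
    · have hnil : s = [] := List.isEmpty_iff.mp hs
      subst hnil
      rw [ih]; simp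
    · rw [if_neg hs, ih, List.filter_filter]
      congr 1
      funext v
      simp [List.all_cons, Bool.and_comm]

theorem valid_property_spec_aux (rs : List (Int × Int)) (vs : List Int) :
    valid_property rs vs = valid_property_alt rs vs := by
  rw [valid_property_eq_all]
  unfold valid_property_alt
  rw [foldl_filter_eq]
  rw [Bool.eq_iff_iff]
  simp only [List.all_eq_true, List.isEmpty_iff, List.filter_eq_nil_iff,
    PySem.Set.mem_ofList, pvAnyRange_eq_any, List.any_eq_true, decide_eq_true_eq,
    Bool.or_eq_true]
  constructor
  · intro h v hv hall
    obtain ⟨r, hr, h1, h2⟩ := h v hv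
    have := hall r hr
    omega
  · intro h v hv
    have hnall := h v hv
    push Not at hnall
    obtain ⟨r, hr, hc1, hc2⟩ := hnall
    exact ⟨r, hr, by omega, by omega⟩

-- ===== VERDICT (by name: the statement is the Claim_ definition above) =====
theorem valid_property_spec : Claim_equal_valid_property := by
  intro rs vs _
  exact valid_property_spec_aux rs vs
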